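-- pv_equiv track=rewrite | github.com/MadalinAndreiComan/Advent-Of-Code-2023 | day3/part2/code.py | search_for_number
-- ===== SOURCE A (Python) =====
-- def search_for_number(line: str, index: int):
--     number = ''
--     # Search if the number continues on the left side of the index
--     for i in range(index, -1, -1):
--         if line[i].isdigit():
--             number += line[i]
--         else:
--             break
--     # Reverse the number
--     number = number[::-1]
--
--     # Search if the number continues on the right side of the index
--     for i in range(index + 1, len(line)):
--         if line[i].isdigit():
--             number += line[i]
--         else:
--             break
--
--     return int(number)
-- ===== SOURCE B (Python) =====
-- def search_for_number(line: str, index: int):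
--     digits = '0123456789'
--     left = line[:index + 1]
--     right = line[index + 1:]
--     head = left[len(left.rstrip(digits)):]          # maximal digit run ending at index
--     tail = right[:len(right) - len(right.lstrip(digits))]  # maximal digit run starting at index + 1
--     return int(head + tail)
-- ===== Notes on version B (the rewrite author's own statement) =====
-- stated objective: idiomatic
-- what changed: Replaces A's two index-by-index character-accumulation loops (with break, string concatenation and a reversal) by slicing the line at index+1 and trimming the two parts with str.rstrip/str.lstrip over the digit set, then converting the concatenation once.
-- outside the precondition, e.g. on search_for_number('1234', -3): A returns 341234, B returns 1234
import Mathlib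
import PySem

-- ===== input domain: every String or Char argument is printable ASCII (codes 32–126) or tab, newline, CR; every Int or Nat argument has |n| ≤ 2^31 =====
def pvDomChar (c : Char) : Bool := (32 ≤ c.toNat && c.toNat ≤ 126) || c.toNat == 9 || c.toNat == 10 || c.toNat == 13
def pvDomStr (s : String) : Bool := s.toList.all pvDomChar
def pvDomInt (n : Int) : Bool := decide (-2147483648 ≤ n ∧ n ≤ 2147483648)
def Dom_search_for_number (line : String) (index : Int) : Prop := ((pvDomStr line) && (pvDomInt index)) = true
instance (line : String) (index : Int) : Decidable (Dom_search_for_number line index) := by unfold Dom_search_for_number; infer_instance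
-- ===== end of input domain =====

-- B slices the line at index+1 and trims with rstrip/lstrip over the digit set instead of A's
-- two index loops that accumulate characters one by one (objective: idiomatic, same cost).


-- ===== PORT A =====
-- the body both of A's loops share: 'for i in <idxs>: if line[i].isdigit(): number += line[i] else: break'
def sfnLoop (cs : List Char) (idxs : List Int) (number : List Char) : List Char :=
  match idxs with
  | [] => number
  | i :: is =>
    match PySem.List.pyGet? cs i with
    | none => number        -- IndexError: excluded by Pre_
    | some c => if PySem.Chars.isdigit c then sfnLoop cs is (number ++ [c]) else number

def search_for_number (line : String) (index : Int) : Int :=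
  let cs := line.toList
  let number := sfnLoop cs (PySem.List.pyRange index (-1) (-1)) []
  let number := (PySem.List.slice? number none none (-1)).getD []     -- number[::-1]
  let number := sfnLoop cs (PySem.List.pyRange (index + 1) (PySem.Str.len line) 1) number
  (PySem.Int.ofChars? number).getD 0     -- int(number); ValueError (empty) excluded by Pre_

-- ===== PORT B =====
-- hand ports of s.rstrip(chars) / s.lstrip(chars) (the chars-argument form is not in PySem):
-- drop characters belonging to chars from the right (resp. left) end; exact for ASCII arguments
def bRstrip (cs chars : List Char) : List Char := (cs.reverse.dropWhile (chars.contains ·)).reverse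
def bLstrip (cs chars : List Char) : List Char := cs.dropWhile (chars.contains ·)

def search_for_number_alt (line : String) (index : Int) : Int :=
  let cs := line.toList
  let digits := "0123456789".toList
  let left := PySem.List.slice cs none (some (index + 1))             -- line[:index+1]
  let right := PySem.List.slice cs (some (index + 1)) none            -- line[index+1:]
  let head := PySem.List.slice left (some ((bRstrip left digits).length : Int)) none
  let tail := PySem.List.slice right none (some ((right.length : Int) - ((bLstrip right digits).length : Int)))
  (PySem.Int.ofChars? (head ++ tail)).getD 0     -- int(head + tail); ValueError excluded by Pre_

-- ===== PRECONDITION & SPEC =====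
-- Pre_ excludes indices below -1 and at/above len(line) — outside the function's intended domain:
-- there A raises IndexError or ValueError or returns an accidental value produced by Python's
-- negative-index wraparound re-reading the line across position 0 — and indices with no adjacent
-- digit, where A raises ValueError (int('')); index = -1 is kept (A's left loop never runs there).
def Pre_search_for_number (line : String) (index : Int) : Prop :=
  (0 ≤ index ∧ index < PySem.Str.len line ∧
    ((PySem.Str.pyGet? line index).any PySem.Chars.isdigit
      || (PySem.Str.pyGet? line (index + 1)).any PySem.Chars.isdigit) = true)
  ∨ (index = -1 ∧ (PySem.Str.pyGet? line 0).any PySem.Chars.isdigit = true)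
instance (line : String) (index : Int) : Decidable (Pre_search_for_number line index) := by unfold Pre_search_for_number; infer_instance
def pvWitness_search_for_number : String × Int := ("a12", 1)

def Spec_search_for_number (line : String) (index : Int) (out : Int) : Prop := out = search_for_number_alt line index
instance (line : String) (index : Int) (out : Int) : Decidable (Spec_search_for_number line index out) := by unfold Spec_search_for_number; infer_instance

-- ===== CLAIM (what is proved, stated in full; the proofs are below) =====
def Claim_equal_search_for_number : Prop := ∀ (line : String) (index : Int), Dom_search_for_number line index → Pre_search_for_number line index → Spec_search_for_number line index (search_for_number line index)

-- ===== LEMMAS AND PROOFS =====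

theorem char_eq_of_toNat {c : Char} {d : Char} (h : c.toNat = d.val.toNat) : c = d :=
  Char.ext (UInt32.toNat_inj.mp h)

theorem digits_toList : "0123456789".toList = ['0','1','2','3','4','5','6','7','8','9'] := by decide

theorem contains_digits_eq_isdigit (c : Char) :
    ("0123456789".toList.contains c) = PySem.Chars.isdigit c := by
  rw [Bool.eq_iff_iff, digits_toList]
  simp only [PySem.Chars.isdigit, List.contains_eq_mem,
    List.mem_cons, decide_eq_true_eq, Bool.and_eq_true, List.not_mem_nil, or_false]
  constructor
  · rintro (rfl|rfl|rfl|rfl|rfl|rfl|rfl|rfl|rfl|rfl) <;> exact ⟨by decide, by decide⟩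
  · rintro ⟨h1, h2⟩
    have h1' : 48 ≤ c.toNat := h1
    have h2' : c.toNat ≤ 57 := h2
    interval_cases hn : c.toNat
    · exact Or.inl (char_eq_of_toNat hn)
    · exact Or.inr <| Or.inl (char_eq_of_toNat hn)
    · exact Or.inr <| Or.inr <| Or.inl (char_eq_of_toNat hn)
    · exact Or.inr <| Or.inr <| Or.inr <| Or.inl (char_eq_of_toNat hn)
    · exact Or.inr <| Or.inr <| Or.inr <| Or.inr <| Or.inl (char_eq_of_toNat hn)
    · exact Or.inr <| Or.inr <| Or.inr <| Or.inr <| Or.inr <| Or.inl (char_eq_of_toNat hn)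
    · exact Or.inr <| Or.inr <| Or.inr <| Or.inr <| Or.inr <| Or.inr <| Or.inl (char_eq_of_toNat hn)
    · exact Or.inr <| Or.inr <| Or.inr <| Or.inr <| Or.inr <| Or.inr <| Or.inr <| Or.inl (char_eq_of_toNat hn)
    · exact Or.inr <| Or.inr <| Or.inr <| Or.inr <| Or.inr <| Or.inr <| Or.inr <| Or.inr <| Or.inl (char_eq_of_toNat hn)
    · exact Or.inr <| Or.inr <| Or.inr <| Or.inr <| Or.inr <| Or.inr <| Or.inr <| Or.inr <| Or.inr (char_eq_of_toNat hn)

theorem sfnLoop_append (cs : List Char) (idxs : List Int) (num : List Char) :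
    sfnLoop cs idxs num = num ++ sfnLoop cs idxs [] := by
  induction idxs generalizing num with
  | nil => simp [sfnLoop]
  | cons i is ih =>
    simp only [sfnLoop]
    cases h : PySem.List.pyGet? cs i with
    | none => simp
    | some c =>
      by_cases hd : PySem.Chars.isdigit c
      · simp only [hd, if_true]
        rw [ih (num ++ [c]), ih ([] ++ [c])]
        simp
      · simp [hd]

-- A's left loop collects exactly the maximal digit run ending at position n, right to left
theorem sfnLoop_left (cs : List Char) (n : Nat) (hn : n < cs.length) :
    sfnLoop cs (PySem.List.pyRange (n : Int) (-1) (-1)) [] =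
      (cs.take (n+1)).reverse.takeWhile PySem.Chars.isdigit := by
  induction n with
  | zero =>
    rw [PySem.List.pyRange_neg_one_cons (by omega), PySem.List.pyRange_neg_one_eq_nil (by omega)]
    simp only [sfnLoop]
    rw [show PySem.List.pyGet? cs ((0:Nat) : Int) = cs[0]? from PySem.List.pyGet?_natCast cs 0]
    rw [List.getElem?_eq_getElem (by omega)]
    simp only [List.take_add_one, List.take_zero, List.nil_append, List.getElem?_eq_getElem (by omega : 0 < cs.length)]
    by_cases hd : PySem.Chars.isdigit cs[0]
    · simp [hd, List.takeWhile]
    · simp [hd, List.takeWhile]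
  | succ m ih =>
    rw [PySem.List.pyRange_neg_one_cons (by omega)]
    simp only [sfnLoop]
    rw [show PySem.List.pyGet? cs ((m+1 : Nat) : Int) = cs[m+1]? from PySem.List.pyGet?_natCast cs (m+1)]
    rw [List.getElem?_eq_getElem hn]
    have hcast : ((m+1 : Nat) : Int) - 1 = ((m : Nat) : Int) := by push_cast; ring
    rw [hcast]
    have htake : (cs.take (m+1+1)).reverse = cs[m+1] :: (cs.take (m+1)).reverse := by
      rw [List.take_add_one, List.getElem?_eq_getElem hn]
      simp
    rw [htake]
    dsimp only
    by_cases hd : PySem.Chars.isdigit cs[m+1]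
    · rw [if_pos hd]
      rw [sfnLoop_append, ih (by omega)]
      simp [List.takeWhile_cons, hd]
    · rw [if_neg hd]
      simp [List.takeWhile_cons, hd]

-- A's right loop collects exactly the maximal digit run starting at position a
theorem sfnLoop_right (cs : List Char) (k a : Nat) (hk : cs.length ≤ a + k) :
    sfnLoop cs (PySem.List.pyRange (a : Int) (cs.length : Int) 1) [] =
      (cs.drop a).takeWhile PySem.Chars.isdigit := by
  induction k generalizing a with
  | zero =>
    rw [PySem.List.pyRange_one_eq_nil (by exact_mod_cast hk)]
    rw [List.drop_eq_nil_of_le (by omega)]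
    simp [sfnLoop]
  | succ j ih =>
    by_cases ha : a < cs.length
    · rw [PySem.List.pyRange_one_cons (by exact_mod_cast ha)]
      simp only [sfnLoop]
      rw [show PySem.List.pyGet? cs ((a : Nat) : Int) = cs[a]? from PySem.List.pyGet?_natCast cs a]
      rw [List.getElem?_eq_getElem ha]
      have hdrop : cs.drop a = cs[a] :: cs.drop (a+1) := (List.getElem_cons_drop ha).symm
      rw [hdrop]
      have hcast : ((a : Nat) : Int) + 1 = ((a+1 : Nat) : Int) := by push_cast; ring
      rw [hcast]
      dsimp only
      by_cases hd : PySem.Chars.isdigit cs[a]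
      · rw [if_pos hd, sfnLoop_append, ih (a+1) (by omega)]
        rw [List.takeWhile_cons]
        simp [hd]
      · rw [if_neg hd, List.takeWhile_cons]
        simp [hd]
    · rw [PySem.List.pyRange_one_eq_nil (by exact_mod_cast (by omega : cs.length ≤ a))]
      rw [List.drop_eq_nil_of_le (by omega)]
      simp [sfnLoop]

-- what B's rstrip-based slice keeps: the maximal p-suffix
theorem drop_rstrip (L : List Char) (p : Char → Bool) :
    L.drop ((L.reverse.dropWhile p).reverse).length = (L.reverse.takeWhile p).reverse := by
  have h : L = (L.reverse.dropWhile p).reverse ++ (L.reverse.takeWhile p).reverse := by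
    rw [← List.reverse_append, List.takeWhile_append_dropWhile, List.reverse_reverse]
  nth_rewrite 2 [h]
  exact List.drop_left

-- what B's lstrip-based slice keeps: the maximal p-prefix
theorem take_lstrip (R : List Char) (p : Char → Bool) :
    R.take (R.length - (R.dropWhile p).length) = R.takeWhile p := by
  have hlen : R.length - (R.dropWhile p).length = (R.takeWhile p).length := by
    have h := List.takeWhile_append_dropWhile (p := p) (l := R)
    have h2 : (R.takeWhile p).length + (R.dropWhile p).length = R.length := by
      conv_rhs => rw [← h]
      rw [List.length_append]
    omega
  rw [hlen]
  nth_rewrite 2 [show R = R.takeWhile p ++ R.dropWhile p from (List.takeWhile_append_dropWhile).symm]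
  exact List.take_left

-- both programs reduce to int of (maximal digit run ending at index) ++ (maximal digit run after index)
theorem sfn_eq (line : String) (index : Int) (h0 : 0 ≤ index) (h1 : index < PySem.Str.len line) :
    search_for_number line index = search_for_number_alt line index := by
  obtain ⟨n, rfl⟩ : ∃ n : Nat, index = (n : Int) := ⟨index.toNat, (Int.toNat_of_nonneg h0).symm⟩
  rw [PySem.Str.len_eq] at h1
  have hn : n < line.toList.length := by exact_mod_cast h1
  set cs := line.toList with hcs
  have hfun : (fun c => ("0123456789".toList.contains c)) = PySem.Chars.isdigit :=
    funext contains_digits_eq_isdigit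
  have hcast1 : ((n : Int) + 1) = ((n+1 : Nat) : Int) := by push_cast; ring
  -- A's side
  simp only [search_for_number]
  rw [PySem.List.slice?_none_none_neg_one, Option.getD_some]
  rw [sfnLoop_append cs (PySem.List.pyRange ((n:Int) + 1) (PySem.Str.len line) 1)]
  rw [sfnLoop_left cs n hn]
  rw [PySem.Str.len_eq, ← hcs, hcast1]
  rw [sfnLoop_right cs cs.length (n+1) (by omega)]
  -- B's side
  simp only [search_for_number_alt, bRstrip, bLstrip, hfun, ← hcs]
  rw [hcast1, PySem.List.slice_to_natCast, PySem.List.slice_from_natCast]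
  rw [PySem.List.slice_from_natCast, drop_rstrip]
  have hlstr : ((cs.drop (n+1)).length : Int) - (((cs.drop (n+1)).dropWhile PySem.Chars.isdigit).length : Int)
      = (((cs.drop (n+1)).length - ((cs.drop (n+1)).dropWhile PySem.Chars.isdigit).length : Nat) : Int) := by
    have := List.length_dropWhile_le (p := PySem.Chars.isdigit) (l := cs.drop (n+1))
    omega
  rw [hlstr, PySem.List.slice_to_natCast, take_lstrip]

-- the index = -1 case: A's left loop is empty and B's left slice is empty; both keep the leading run
theorem sfn_eq_neg_one (line : String) :
    search_for_number line (-1) = search_for_number_alt line (-1) := by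
  set cs := line.toList with hcs
  have hfun : (fun c => ("0123456789".toList.contains c)) = PySem.Chars.isdigit :=
    funext contains_digits_eq_isdigit
  -- A's side
  simp only [search_for_number]
  rw [PySem.List.pyRange_neg_one_eq_nil (by omega)]
  simp only [sfnLoop]
  rw [PySem.List.slice?_none_none_neg_one, Option.getD_some, List.reverse_nil]
  rw [show (-1 : Int) + 1 = ((0:Nat) : Int) from by norm_num]
  rw [PySem.Str.len_eq, ← hcs]
  rw [sfnLoop_right cs cs.length 0 (by omega)]
  -- B's side
  simp only [search_for_number_alt, bRstrip, bLstrip, hfun, ← hcs]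
  rw [show (-1 : Int) + 1 = ((0:Nat) : Int) from by norm_num]
  rw [PySem.List.slice_to_natCast, PySem.List.slice_from_natCast]
  simp only [List.take_zero, List.drop_zero, List.reverse_nil, List.dropWhile_nil,
    List.length_nil, Nat.cast_zero]
  rw [show (0 : Int) = ((0:Nat) : Int) from rfl, PySem.List.slice_from_natCast]
  simp only [List.drop_zero]
  have hlstr : ((cs.length : Int)) - (((cs.dropWhile PySem.Chars.isdigit).length : Int))
      = (((cs.length - (cs.dropWhile PySem.Chars.isdigit).length : Nat) : Int)) := by
    have := List.length_dropWhile_le (p := PySem.Chars.isdigit) (l := cs)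
    omega
  rw [hlstr, PySem.List.slice_to_natCast, take_lstrip]
  simp

-- ===== VERDICT (by name: the statement is the Claim_ definition above) =====
theorem search_for_number_spec : Claim_equal_search_for_number := by
  intro line index _ hPre
  rcases hPre with ⟨h0, h1, _⟩ | ⟨rfl, _⟩
  · exact sfn_eq line index h0 h1
  · exact sfn_eq_neg_one line
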